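-- pv_equiv track=rewrite | github.com/Eurydia/an-awkward-amount-of-change | main.py | make_awkward
-- ===== SOURCE A (Python) =====
-- from typing import Dict, List
--
-- def make_awkward(
--     original_amount: int,
--     awkward_amount: int,
--     usable_units: List[int],
-- ) -> List[int]:
--
--     """This create an awkward way to get to an arbitary amount.
--     In this case "awkward way" means that the other party
--     has to provide all of the change themselves.
--
--     For example, I owe you $12. If I were to give you
--     one $10 and three $1s, you will simply return the extra $1 back to me.
--     However, if I give you one $10 and one $5, you now have to find
--     two $1s to give me as change.
--
--     This function ensure that the second case happens
--     if it cannot happen the it will return and empty list instead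
--     of a list of integers
--
--     Args:
--         original_amount (int): The original amount of money
--         awkward_amount (int): The awkward ammount of money to get to
--         usable_units (List[int]): A list containing the units currency available
--
--     Returns:
--         List[int]: A list of integers containing awkward amount of change
--     """
--     res: List[int] = []
--     for unit in usable_units:
--         while True:
--             res.append(unit)
--             if (
--                 sum(res) == original_amount
--                 or sum(res) > awkward_amount
--             ):
--                 res.pop(-1)
--                 break
--
--     if sum(res) <= original_amount:
--         return []
--
--     return res
-- ===== SOURCE B (Python) =====
-- from typing import List
--
-- def make_awkward(
--     original_amount: int,
--     awkward_amount: int,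
--     usable_units: List[int],
-- ) -> List[int]:
--     res: List[int] = []
--     t = 0
--     for unit in usable_units:
--         k = (awkward_amount - t) // unit
--         if t < original_amount and (original_amount - t) % unit == 0:
--             k = min(k, (original_amount - t) // unit - 1)
--         if k < 0:
--             k = 0
--         res.extend([unit] * k)
--         t += k * unit
--     return [] if t <= original_amount else res
-- ===== Notes on version B (the rewrite author's own statement) =====
-- stated objective: alternative
-- what changed: Per-copy appending with a full sum(res) recomputed at every append is replaced by one closed-form division per unit (coins that fit under awkward_amount, capped one short of an exact hit of original_amount) plus a running total; intended as faster, but a timing run could not take a reading (A times out on its inputs).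
-- outside the precondition, e.g. on make_awkward(0, -1, [0]): A returns [], B raises ZeroDivisionError
import Mathlib
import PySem

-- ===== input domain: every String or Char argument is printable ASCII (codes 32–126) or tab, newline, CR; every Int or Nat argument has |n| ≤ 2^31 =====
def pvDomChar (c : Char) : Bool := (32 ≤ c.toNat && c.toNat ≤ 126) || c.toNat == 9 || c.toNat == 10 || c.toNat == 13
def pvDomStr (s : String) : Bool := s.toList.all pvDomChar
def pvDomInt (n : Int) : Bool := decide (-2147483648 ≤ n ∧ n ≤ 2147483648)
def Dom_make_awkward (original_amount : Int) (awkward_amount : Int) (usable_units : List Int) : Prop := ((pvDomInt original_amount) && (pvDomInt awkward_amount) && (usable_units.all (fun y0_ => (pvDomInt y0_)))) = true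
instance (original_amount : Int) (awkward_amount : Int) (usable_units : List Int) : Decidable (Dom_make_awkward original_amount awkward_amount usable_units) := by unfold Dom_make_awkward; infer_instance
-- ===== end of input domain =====

-- One honest line: B replaces A's per-copy append loop (which re-sums the list at every
-- append) with one closed-form division per unit; proved equal on positive units.
-- ===== PORT A =====
-- inner `while True` loop of A; fuel only makes the recursion total (unreachable under Pre_)
def awLoop (original_amount awkward_amount unit : Int) (fuel : Nat) (res : List Int) : List Int :=
  match fuel with
  | 0 => res
  | fuel + 1 =>
    let res' := res ++ [unit]                         -- res.append(unit)
    if res'.sum = original_amount ∨ res'.sum > awkward_amount then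
      match PySem.List.pop? res' (-1) with            -- res.pop(-1)
      | some (_, rest) => rest
      | none => res'
    else awLoop original_amount awkward_amount unit fuel res'

def make_awkward (original_amount : Int) (awkward_amount : Int) (usable_units : List Int) : List Int :=
  let res := usable_units.foldl
    (fun res unit =>
      awLoop original_amount awkward_amount unit ((awkward_amount - res.sum).toNat + 2) res)
    []
  if res.sum ≤ original_amount then [] else res

-- ===== PORT B =====
-- the closed-form count of copies of `unit` that fit (k in Source B)
def kB (original_amount awkward_amount t unit : Int) : Int :=
  let k := PySem.Int.floordiv (awkward_amount - t) unit
  let k := if t < original_amount ∧ PySem.Int.mod (original_amount - t) unit = 0 then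
             min k (PySem.Int.floordiv (original_amount - t) unit - 1) else k
  if k < 0 then 0 else k

def bStep (original_amount awkward_amount : Int) (p : List Int × Int) (unit : Int) : List Int × Int :=
  let k := kB original_amount awkward_amount p.2 unit
  (p.1 ++ List.replicate k.toNat unit, p.2 + k * unit)

def make_awkward_alt (original_amount : Int) (awkward_amount : Int) (usable_units : List Int) : List Int :=
  let p := usable_units.foldl (bStep original_amount awkward_amount) ([], 0)
  if p.2 ≤ original_amount then [] else p.1

-- ===== PRECONDITION & SPEC =====
-- Pre_ restricts to the natural domain of positive currency units: on a list containing a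
-- unit ≤ 0 A almost always loops forever (it returns only when every such unit's loop
-- breaks on its first append), and B's division raises ZeroDivisionError on unit 0.
def Pre_make_awkward (original_amount : Int) (awkward_amount : Int) (usable_units : List Int) : Prop :=
  ∀ u ∈ usable_units, 0 < u
instance (original_amount : Int) (awkward_amount : Int) (usable_units : List Int) : Decidable (Pre_make_awkward original_amount awkward_amount usable_units) := by unfold Pre_make_awkward; infer_instance
def pvWitness_make_awkward : Int × Int × List Int := (12, 15, [10, 5, 1])
def Spec_make_awkward (original_amount : Int) (awkward_amount : Int) (usable_units : List Int) (out : List Int) : Prop := out = make_awkward_alt original_amount awkward_amount usable_units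
instance (original_amount : Int) (awkward_amount : Int) (usable_units : List Int) (out : List Int) : Decidable (Spec_make_awkward original_amount awkward_amount usable_units out) := by unfold Spec_make_awkward; infer_instance

-- ===== CLAIM (what is proved, stated in full; the proofs are below) =====
def Claim_equal_make_awkward : Prop := ∀ (original_amount : Int) (awkward_amount : Int) (usable_units : List Int), Dom_make_awkward original_amount awkward_amount usable_units → Pre_make_awkward original_amount awkward_amount usable_units → Spec_make_awkward original_amount awkward_amount usable_units (make_awkward original_amount awkward_amount usable_units)

-- ===== LEMMAS AND PROOFS =====

lemma kB_nonneg (o a t u : Int) : 0 ≤ kB o a t u := by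
  unfold kB; dsimp only; split_ifs <;> omega

lemma kB_stop (o a t u : Int) (hu : 0 < u) (h : t + u = o ∨ a < t + u) : kB o a t u = 0 := by
  obtain ⟨hc1, hc2⟩ := (PySem.Int.floordiv_eq_iff_of_pos hu (q := PySem.Int.floordiv (a - t) u)).mp rfl
  unfold kB; dsimp only
  rcases h with h | h
  · have hdvd : PySem.Int.mod (o - t) u = 0 := by
      rw [PySem.Int.mod_eq_zero_iff_dvd]; exact ⟨1, by omega⟩
    have hm : PySem.Int.floordiv (o - t) u = 1 := by
      rw [PySem.Int.floordiv_eq_iff_of_pos hu]; constructor <;> nlinarith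
    have ho : t < o := by omega
    rw [if_pos (show t < o ∧ PySem.Int.mod (o - t) u = 0 from ⟨ho, hdvd⟩), hm]
    simp only [min_def]
    split_ifs <;> omega
  · have hc0 : PySem.Int.floordiv (a - t) u ≤ 0 := by nlinarith
    split_ifs <;> omega

lemma kB_step (o a t u : Int) (hu : 0 < u) (h1 : t + u ≠ o) (h2 : t + u ≤ a) :
    kB o a t u = kB o a (t + u) u + 1 := by
  obtain ⟨hc1, hc2⟩ := (PySem.Int.floordiv_eq_iff_of_pos hu (q := PySem.Int.floordiv (a - t) u)).mp rfl
  have hc' : PySem.Int.floordiv (a - (t + u)) u = PySem.Int.floordiv (a - t) u - 1 := by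
    rw [PySem.Int.floordiv_eq_iff_of_pos hu]; constructor <;> nlinarith
  have hcpos : 1 ≤ PySem.Int.floordiv (a - t) u := by nlinarith
  have hmodeq : PySem.Int.mod (o - (t + u)) u = PySem.Int.mod (o - t) u := by
    have h : o - (t + u) = (o - t) - u := by ring
    rw [h, PySem.Int.mod_eq_emod_of_pos hu, PySem.Int.mod_eq_emod_of_pos hu]
    exact Int.sub_emod_right (o - t) u
  unfold kB; dsimp only
  by_cases hd : t < o ∧ PySem.Int.mod (o - t) u = 0
  · obtain ⟨ho, hmod⟩ := hd
    obtain ⟨m, hm⟩ := (PySem.Int.mod_eq_zero_iff_dvd _ _).mp hmod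
    have hmfl : PySem.Int.floordiv (o - t) u = m := by
      rw [PySem.Int.floordiv_eq_iff_of_pos hu]; constructor <;> nlinarith
    have hmpos : 1 ≤ m := by nlinarith
    have hm2 : 2 ≤ m := by
      rcases lt_or_ge m 2 with hlt | hge
      · exfalso; have hm1 : m = 1 := by omega
        rw [hm1, mul_one] at hm; omega
      · exact hge
    have ho' : t + u < o := by nlinarith
    have hmfl' : PySem.Int.floordiv (o - (t + u)) u = m - 1 := by
      rw [PySem.Int.floordiv_eq_iff_of_pos hu]; constructor <;> nlinarith
    rw [if_pos (show t < o ∧ PySem.Int.mod (o - t) u = 0 from ⟨ho, hmod⟩),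
        if_pos (show t + u < o ∧ PySem.Int.mod (o - (t + u)) u = 0 from ⟨ho', by rw [hmodeq]; exact hmod⟩),
        hmfl, hmfl', hc']
    simp only [min_def]
    split_ifs <;> omega
  · have hd' : ¬ (t + u < o ∧ PySem.Int.mod (o - (t + u)) u = 0) := by
      rw [hmodeq]
      rintro ⟨ho', hmod⟩
      exact hd ⟨by omega, hmod⟩
    rw [if_neg hd, if_neg hd', hc']
    split_ifs <;> omega

lemma kB_le (o a t u : Int) (hu : 0 < u) : kB o a t u ≤ max 0 (a - t) := by
  obtain ⟨hc1, hc2⟩ := (PySem.Int.floordiv_eq_iff_of_pos hu (q := PySem.Int.floordiv (a - t) u)).mp rfl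
  have h : kB o a t u ≤ max 0 (PySem.Int.floordiv (a - t) u) := by
    unfold kB; dsimp only; split_ifs <;> omega
  by_cases h0 : PySem.Int.floordiv (a - t) u ≤ 0
  · omega
  · have : PySem.Int.floordiv (a - t) u ≤ a - t := by nlinarith
    omega

lemma sum_replicate_int (n : Nat) (u : Int) : (List.replicate n u).sum = (n : Int) * u := by
  simp [List.sum_replicate, nsmul_eq_mul]

lemma awLoop_eq (o a u : Int) (hu : 0 < u) :
    ∀ (fuel : Nat) (res : List Int), kB o a res.sum u < (fuel : Int) →
    awLoop o a u fuel res = res ++ List.replicate (kB o a res.sum u).toNat u := by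
  intro fuel
  induction fuel with
  | zero => intro res h; have := kB_nonneg o a res.sum u; omega
  | succ n ih =>
    intro res h
    unfold awLoop
    simp only [List.sum_append, List.sum_cons, List.sum_nil, add_zero]
    by_cases hc : res.sum + u = o ∨ res.sum + u > a
    · rw [if_pos hc, PySem.List.pop?_last, kB_stop o a res.sum u hu (by omega)]
      simp
    · push_neg at hc
      rw [if_neg (by push_neg; omega)]
      have hstep := kB_step o a res.sum u hu hc.1 hc.2
      have hrec := ih (res ++ [u]) (by simpa [List.sum_append] using (by omega : kB o a (res.sum + u) u < (n : Int)))
      rw [hrec]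
      have hk' := kB_nonneg o a (res.sum + u) u
      simp only [List.sum_append, List.sum_cons, List.sum_nil, add_zero, hstep]
      rw [show (kB o a (res.sum + u) u + 1).toNat = (kB o a (res.sum + u) u).toNat + 1 by omega]
      simp [List.replicate_succ, List.append_assoc]

lemma foldB_sum (o a : Int) :
    ∀ (us : List Int) (p : List Int × Int), p.2 = p.1.sum →
    (us.foldl (bStep o a) p).2 = (us.foldl (bStep o a) p).1.sum := by
  intro us
  induction us with
  | nil => intro p hp; simpa using hp
  | cons u us ih =>
    intro p hp
    simp only [List.foldl_cons]
    apply ih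
    have hk := kB_nonneg o a p.2 u
    simp only [bStep]
    rw [List.sum_append, sum_replicate_int, Int.toNat_of_nonneg hk, hp]

lemma foldA_eq (o a : Int) :
    ∀ (us : List Int) (res : List Int), (∀ u ∈ us, 0 < u) →
    us.foldl (fun res unit => awLoop o a unit ((a - res.sum).toNat + 2) res) res
      = (us.foldl (bStep o a) (res, res.sum)).1 := by
  intro us
  induction us with
  | nil => intro res _; rfl
  | cons u us ih =>
    intro res hpos
    have hu : 0 < u := hpos u (by simp)
    have hfuel : kB o a res.sum u < ((a - res.sum).toNat + 2 : Nat) := by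
      have := kB_le o a res.sum u hu
      push_cast; omega
    simp only [List.foldl_cons]
    rw [awLoop_eq o a u hu _ res hfuel,
        ih _ (fun v hv => hpos v (by simp [hv]))]
    have hk := kB_nonneg o a res.sum u
    have hsum : (res ++ List.replicate (kB o a res.sum u).toNat u).sum = res.sum + kB o a res.sum u * u := by
      rw [List.sum_append, sum_replicate_int, Int.toNat_of_nonneg hk]
    simp only [bStep, hsum]

-- ===== VERDICT (by name: the statement is the Claim_ definition above) =====
theorem make_awkward_spec : Claim_equal_make_awkward := by
  intro o a us _ hpre
  unfold Spec_make_awkward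
  have h1 := foldA_eq o a us [] hpre
  have h2 := foldB_sum o a us ([], 0) (by simp)
  simp only [List.sum_nil] at h1
  simp only [make_awkward, make_awkward_alt, h1, h2]
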